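-- pv_equiv track=rewrite | github.com/hupratt/ecom | ecom/core/api/views.py | serialize_URL_params
-- ===== SOURCE A (Python) =====
-- def naive_grouper(inputs, n):
--     # transform URL params
--     # Humberto Werneck, true, Jean-Yves Loude, true, Jack, false
--     # into
--     # [('Humberto Werneck', 'true'), ('Jean-Yves Loude', 'true'), ('Jack', 'false')]
--     num_groups = len(inputs) // n
--     return [tuple(inputs[i * n : (i + 1) * n]) for i in range(num_groups)]
--
-- def serialize_URL_params(query_param):
--     # transform URL param
--     # &authors=Humberto Werneck, true, Jean-Yves Loude, true, Jack, false
--     # into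
--     # ['Humberto Werneck', 'Jean-Yves Loude']
--     groups, result = [], []
--     for k, v in query_param.items():
--         if k == "authors" or k == "":
--             groups = naive_grouper(v.split(","), 2)
--     for search in groups:
--         author, boolean = search
--         if boolean == "true":
--             result.append(author)
--     return result
-- ===== SOURCE B (Python) =====
-- def serialize_URL_params(query_param):
--     # single strided pass over the flat comma-split list; no tuple grouping helper
--     parts = None
--     for k, v in query_param.items():
--         if k == "authors" or k == "":
--             parts = v.split(",")
--     if parts is None:
--         return []
--     return [parts[i] for i in range(0, len(parts) - 1, 2) if parts[i + 1] == "true"]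
-- ===== Notes on version B (the rewrite author's own statement) =====
-- stated objective: simpler
-- what changed: Drops the naive_grouper tuple-building helper and the separate filter loop: the matched value's comma-split list is scanned once with a stride-2 index comprehension that emits parts[i] when parts[i+1] == 'true'.
import Mathlib
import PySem

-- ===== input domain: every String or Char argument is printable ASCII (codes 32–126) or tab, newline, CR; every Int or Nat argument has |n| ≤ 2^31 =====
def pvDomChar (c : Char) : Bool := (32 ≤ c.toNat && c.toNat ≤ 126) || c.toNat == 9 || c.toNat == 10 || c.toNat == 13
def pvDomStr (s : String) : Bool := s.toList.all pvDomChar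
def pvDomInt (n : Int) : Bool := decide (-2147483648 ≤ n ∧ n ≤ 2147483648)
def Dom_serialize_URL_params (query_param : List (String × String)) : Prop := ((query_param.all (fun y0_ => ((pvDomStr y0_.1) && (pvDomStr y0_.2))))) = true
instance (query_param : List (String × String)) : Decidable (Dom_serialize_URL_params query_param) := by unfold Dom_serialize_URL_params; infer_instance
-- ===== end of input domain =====

-- ===== PORT A =====
-- B fuses A's grouping helper and filter loop into one strided index pass (objective: simpler).
def naive_grouper (inputs : List String) (n : Int) : List (String × String) :=
  let num_groups := PySem.Int.floordiv (PySem.List.len inputs) n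
  (PySem.List.pyRange 0 num_groups 1).map (fun i =>
    let g := PySem.List.slice inputs (some (i * n)) (some ((i + 1) * n))
    -- Python builds an n-tuple; at the only call site n = 2, so the tuple is the
    -- slice's two elements (every produced slice has length exactly 2)
    (PySem.List.pyGetD g 0 "", PySem.List.pyGetD g 1 ""))

def serialize_URL_params (query_param : List (String × String)) : List String :=
  let groups := query_param.foldl (fun groups kv =>
    if kv.1 == "authors" || kv.1 == "" then
      naive_grouper ((PySem.Str.split? kv.2 ",").getD []) 2   -- sep "," is nonempty: split? is some
    else groups) ([] : List (String × String))
  groups.foldl (fun result s => if s.2 == "true" then result ++ [s.1] else result) []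

-- ===== PORT B =====
def serialize_URL_params_alt (query_param : List (String × String)) : List String :=
  let parts? := query_param.foldl (fun p kv =>
    if kv.1 == "authors" || kv.1 == "" then some ((PySem.Str.split? kv.2 ",").getD []) else p)
    (none : Option (List String))
  match parts? with
  | none => []
  | some parts =>
    ((PySem.List.pyRange 0 (PySem.List.len parts - 1) 2).filter
        (fun i => PySem.List.pyGetD parts (i + 1) "" == "true")).map
      (fun i => PySem.List.pyGetD parts i "")

-- ===== PRECONDITION & SPEC =====
def Spec_serialize_URL_params (query_param : List (String × String)) (out : List String) : Prop := out = serialize_URL_params_alt query_param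
instance (query_param : List (String × String)) (out : List String) : Decidable (Spec_serialize_URL_params query_param out) := by unfold Spec_serialize_URL_params; infer_instance

-- ===== CLAIM (what is proved, stated in full; the proofs are below) =====
def Claim_equal_serialize_URL_params : Prop := ∀ (query_param : List (String × String)), Dom_serialize_URL_params query_param → Spec_serialize_URL_params query_param (serialize_URL_params query_param)

-- ===== LEMMAS AND PROOFS =====

lemma grouper_eq (parts : List String) :
    naive_grouper parts 2 =
      (List.range (parts.length / 2)).map
        (fun k => (parts.getD (2 * k) "", parts.getD (2 * k + 1) "")) := by
  unfold naive_grouper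
  rw [PySem.List.len_eq,
    show PySem.Int.floordiv ((parts.length : Int)) 2 = ((parts.length / 2 : Nat) : Int) from by
      simp [PySem.Int.floordiv, Int.fdiv_eq_ediv],
    ]
  simp only []
  rw [PySem.List.pyRange_one]
  simp only [sub_zero, Int.toNat_natCast, List.map_map]
  refine List.map_congr_left (fun k _ => ?_)
  simp only [Function.comp_apply, zero_add]
  rw [show ((k : Int)) * 2 = ((2 * k : Nat) : Int) from by push_cast; ring,
    show ((k : Int) + 1) * 2 = ((2 * k : Nat) : Int) + ((2 : Nat) : Int) from by push_cast; ring,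
    PySem.List.slice_natCast_add]
  simp [PySem.List.pyGetD_ofNat', List.getD_eq_getElem?_getD, List.getElem?_drop]

-- canonical form both sides reduce to
def pvPairs (parts : List String) : List String :=
  ((List.range (parts.length / 2)).filter
      (fun k => parts.getD (2 * k + 1) "" == "true")).map
    (fun k => parts.getD (2 * k) "")

lemma a_side (parts : List String) :
    (naive_grouper parts 2).foldl
      (fun result s => if s.2 == "true" then result ++ [s.1] else result) [] = pvPairs parts := by
  rw [grouper_eq]
  simp only [PySem.List.foldl_append_if]
  simp [pvPairs, List.filter_map, Function.comp_def]

lemma hfilt (parts : List String) (k : Nat) :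
    ((fun i => PySem.List.pyGetD parts (i + 1) "" == "true") ∘ fun k : Nat => (0:Int) + 2 * ↑k) k
      = (parts.getD (2 * k + 1) "" == "true") := by
  simp only [Function.comp_apply, zero_add]
  rw [show (2 * (k:Int) + 1) = ((2 * k + 1 : Nat) : Int) from by push_cast; ring,
    PySem.List.pyGetD_natCast]

lemma hmap (parts : List String) (k : Nat) :
    ((fun i => PySem.List.pyGetD parts i "") ∘ fun k : Nat => (0:Int) + 2 * ↑k) k
      = parts.getD (2 * k) "" := by
  simp only [Function.comp_apply, zero_add]
  rw [show (2 * (k:Int)) = ((2 * k : Nat) : Int) from by push_cast; ring,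
    PySem.List.pyGetD_natCast]

lemma b_side (parts : List String) :
    ((PySem.List.pyRange 0 (PySem.List.len parts - 1) 2).filter
        (fun i => PySem.List.pyGetD parts (i + 1) "" == "true")).map
      (fun i => PySem.List.pyGetD parts i "") = pvPairs parts := by
  rw [PySem.List.len_eq, PySem.List.pyRange_of_pos 0 ((parts.length : Int) - 1) (by norm_num),
    show (if (0:Int) < (parts.length:Int) - 1
        then ((((parts.length:Int)) - 1 - 0 + 2 - 1)/2).toNat else 0) = parts.length / 2 from by
      split_ifs with h <;> omega]
  rw [List.filter_map, List.map_map]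
  unfold pvPairs
  rw [List.filter_congr (fun k _ => hfilt parts k)]
  exact List.map_congr_left (fun k _ => hmap parts k)

def pvGrp : Option (List String) → List (String × String)
  | none => []
  | some parts => naive_grouper parts 2

lemma fold_rel (qp : List (String × String)) (p0 : Option (List String)) :
    qp.foldl (fun groups kv =>
      if kv.1 == "authors" || kv.1 == "" then
        naive_grouper ((PySem.Str.split? kv.2 ",").getD []) 2
      else groups) (pvGrp p0)
    = pvGrp (qp.foldl (fun p kv =>
        if kv.1 == "authors" || kv.1 == "" then some ((PySem.Str.split? kv.2 ",").getD []) else p) p0) := by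
  induction qp generalizing p0 with
  | nil => rfl
  | cons kv t ih =>
    simp only [List.foldl_cons]
    by_cases h : (kv.1 == "authors" || kv.1 == "") = true
    · simp only [h, if_pos]
      exact ih (some ((PySem.Str.split? kv.2 ",").getD []))
    · simp only [h, if_neg, Bool.not_eq_true]
      exact ih p0

-- ===== VERDICT (by name: the statement is the Claim_ definition above) =====
theorem serialize_URL_params_spec : Claim_equal_serialize_URL_params := by
  intro qp _
  unfold Spec_serialize_URL_params serialize_URL_params serialize_URL_params_alt
  have h := fold_rel qp none
  simp only [pvGrp] at h
  rw [h]
  cases hp : qp.foldl (fun p kv =>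
      if kv.1 == "authors" || kv.1 == "" then some ((PySem.Str.split? kv.2 ",").getD []) else p)
      (none : Option (List String)) with
  | none => rfl
  | some parts => exact (a_side parts).trans (b_side parts).symm
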